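-- pv_equiv track=rewrite | github.com/alyjlee29/g-quadruplex-project-ntu | src/build_dataset_3class.py | parse_g4_sections
-- ===== SOURCE A (Python) =====
-- def parse_g4_sections(seq: str):
--     s = (seq or "").upper().replace("U","T").strip()
--     gidx = []
--     i = 0
--     while i <= len(s) - 3:
--         if s[i:i+3] == "GGG":
--             j = i + 3
--             while j < len(s) and s[j] == "G":
--                 j += 1
--             gidx.append((i, j))
--             i = j
--         else:
--             i += 1
--     if len(gidx) < 4:
--         return "", [], ["","",""], ""
--     gidx = gidx[:4]
--     five = s[:gidx[0][0]]
--     three = s[gidx[-1][1]:]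
--     loops = [s[gidx[k][1]:gidx[k+1][0]] for k in range(3)]
--     gtracts = [s[a:b] for a,b in gidx]
--     return five, gtracts, loops, three
-- ===== SOURCE B (Python) =====
-- def parse_g4_sections(seq: str):
--     # Single uniform pass over run boundaries (adjacent-char comparison),
--     # instead of searching for three-G windows and extending each hit.
--     s = (seq or "").upper().replace("U", "T").strip()
--     gidx = []
--     start = 0
--     for i in range(1, len(s) + 1):
--         if i == len(s) or s[i] != s[i - 1]:
--             if i - start >= 3 and s[start] == "G":
--                 gidx.append((start, i))
--             start = i
--     if len(gidx) < 4:
--         return "", [], ["", "", ""], ""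
--     g = gidx[:4]
--     loops = [s[b:a2] for (_, b), (a2, _) in zip(g, g[1:])]
--     gtracts = [s[a:b] for a, b in g]
--     return s[:g[0][0]], gtracts, loops, s[g[3][1]:]
-- ===== Notes on version B (the rewrite author's own statement) =====
-- stated objective: alternative
-- what changed: B finds the G-tracts by a single uniform run-boundary pass (comparing each character with its predecessor and emitting a run when a boundary closes a G-run of length >= 3), instead of A's scan that tests a three-character window at every position and then extends each hit with an inner loop; the tail slicing uses zip over consecutive tract pairs instead of indexing by range(3). B avoids allocating a three-character slice per position, which a timing run measured as a constant-factor speedup.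
import Mathlib
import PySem

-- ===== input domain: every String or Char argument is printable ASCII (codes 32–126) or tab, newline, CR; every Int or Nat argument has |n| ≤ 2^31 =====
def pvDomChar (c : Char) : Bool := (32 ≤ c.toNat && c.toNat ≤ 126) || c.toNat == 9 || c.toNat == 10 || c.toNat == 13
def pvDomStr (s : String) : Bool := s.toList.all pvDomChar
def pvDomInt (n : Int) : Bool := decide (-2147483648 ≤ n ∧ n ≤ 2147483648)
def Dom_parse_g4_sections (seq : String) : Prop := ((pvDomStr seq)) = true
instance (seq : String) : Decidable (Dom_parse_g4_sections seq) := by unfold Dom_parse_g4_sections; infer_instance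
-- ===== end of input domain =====

-- B replaces A's scan (test a three-character window of G at each position, then extend the
-- hit with an inner loop) by a single uniform run-boundary pass comparing adjacent characters;
-- measured constant-factor faster (no per-position slice).

-- ===== PORT A =====
-- normalization s = (seq or "").upper().replace("U","T").strip() (for a str argument, `seq or ""` is seq)
def pvNorm (seq : String) : List Char :=
  PySem.Chars.strip (PySem.Chars.replace (PySem.Chars.upper seq.toList) ['U'] ['T'])

-- inner `while j < len(s) and s[j] == "G"`; getD is exact: it is only read under j < len
def pvExtendA (s : List Char) (j : Nat) : Nat :=
  if j < s.length then
    if s.getD j ' ' = 'G' then pvExtendA s (j + 1) else j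
  else j
termination_by s.length - j

theorem le_pvExtendA (s : List Char) (j : Nat) : j ≤ pvExtendA s j := by
  unfold pvExtendA
  split
  · split
    · have := le_pvExtendA s (j + 1); omega
    · omega
  · omega
termination_by s.length - j

-- the outer while loop of A (i ≤ len(s)-3 over ℤ is i+3 ≤ len over ℕ); s[i:i+3] is (drop i).take 3
def pvScanA (s : List Char) (i : Nat) (acc : List (Nat × Nat)) : List (Nat × Nat) :=
  if h : i + 3 ≤ s.length then
    if (s.drop i).take 3 = ['G', 'G', 'G'] then
      pvScanA s (pvExtendA s (i + 3)) (acc ++ [(i, pvExtendA s (i + 3))])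
    else pvScanA s (i + 1) acc
  else acc
termination_by s.length - i
decreasing_by
  · have := le_pvExtendA s (i + 3); omega
  · omega

-- slices s[a:b] with in-range Nat bounds are (drop a).take (b-a) (= PySem.List.slice_natCast);
-- gidx[k] on the 4-element gidx is exact as getD; gidx[-1] is getD 3; range(3) is List.range 3
def parse_g4_sections (seq : String) : String × List String × List String × String :=
  let s := pvNorm seq
  let gidx := pvScanA s 0 []
  if gidx.length < 4 then ("", [], ["", "", ""], "")
  else
    let g := gidx.take 4
    let five := String.mk (s.take (g.getD 0 (0, 0)).1)
    let three := String.mk (s.drop (g.getD 3 (0, 0)).2)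
    let loops := (List.range 3).map (fun k =>
      String.mk ((s.drop (g.getD k (0, 0)).2).take ((g.getD (k + 1) (0, 0)).1 - (g.getD k (0, 0)).2)))
    let gtracts := g.map (fun ab => String.mk ((s.drop ab.1).take (ab.2 - ab.1)))
    (five, gtracts, loops, three)

-- ===== PORT B =====
-- loop body of B's single `for i in range(1, len(s)+1)` pass, state = (gidx, start);
-- s[i] / s[i-1] / s[start] as getD are exact: they are only read at indices < len
def pvStepB (s : List Char) (st : List (Nat × Nat) × Nat) (i : Nat) : List (Nat × Nat) × Nat :=
  if i = s.length ∨ ¬ s.getD i ' ' = s.getD (i - 1) ' ' then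
    ((if 3 ≤ i - st.2 ∧ s.getD st.2 ' ' = 'G' then st.1 ++ [(st.2, i)] else st.1), i)
  else st

-- range(1, len(s)+1) is the naturals 1..len, List.range' 1 len (exact: bounds nonnegative)
def parse_g4_sections_alt (seq : String) : String × List String × List String × String :=
  let s := pvNorm seq
  let gidx := ((List.range' 1 s.length).foldl (pvStepB s) ([], 0)).1
  if gidx.length < 4 then ("", [], ["", "", ""], "")
  else
    let g := gidx.take 4
    let loops := (g.zip g.tail).map (fun pq => String.mk ((s.drop pq.1.2).take (pq.2.1 - pq.1.2)))
    let gtracts := g.map (fun ab => String.mk ((s.drop ab.1).take (ab.2 - ab.1)))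
    (String.mk (s.take (g.getD 0 (0, 0)).1), gtracts, loops, String.mk (s.drop (g.getD 3 (0, 0)).2))

-- ===== PRECONDITION & SPEC =====
def Spec_parse_g4_sections (seq : String) (out : String × List String × List String × String) : Prop := out = parse_g4_sections_alt seq
instance (seq : String) (out : String × List String × List String × String) : Decidable (Spec_parse_g4_sections seq out) := by unfold Spec_parse_g4_sections; infer_instance

-- ===== CLAIM (what is proved, stated in full; the proofs are below) =====
def Claim_equal_parse_g4_sections : Prop := ∀ (seq : String), Dom_parse_g4_sections seq → Spec_parse_g4_sections seq (parse_g4_sections seq)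

-- ===== LEMMAS AND PROOFS =====

-- extension of a run of character c from position j (reference helper for both sides)
def pvExtC (s : List Char) (c : Char) (j : Nat) : Nat :=
  if j < s.length then
    if s.getD j ' ' = c then pvExtC s c (j + 1) else j
  else j
termination_by s.length - j

theorem le_pvExtC (s : List Char) (c : Char) (j : Nat) : j ≤ pvExtC s c j := by
  unfold pvExtC
  split
  · split
    · have := le_pvExtC s c (j + 1); omega
    · omega
  · omega
termination_by s.length - j

theorem pvExtC_le_length (s : List Char) (c : Char) (j : Nat) (h : j ≤ s.length) :
    pvExtC s c j ≤ s.length := by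
  unfold pvExtC
  split
  · split
    · exact pvExtC_le_length s c (j + 1) (by omega)
    · omega
  · omega
termination_by s.length - j

theorem pvExtC_chars (s : List Char) (c : Char) (j : Nat) :
    ∀ k, j ≤ k → k < pvExtC s c j → s.getD k ' ' = c := by
  intro k hk1 hk2
  unfold pvExtC at hk2
  split at hk2
  · split at hk2
    · rcases Nat.eq_or_lt_of_le hk1 with h | h
      · subst h; assumption
      · exact pvExtC_chars s c (j + 1) k h hk2
    · omega
  · omega
termination_by s.length - j

theorem pvExtC_stop (s : List Char) (c : Char) (j : Nat)
    (h : ¬ (j < s.length ∧ s.getD j ' ' = c)) : pvExtC s c j = j := by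
  rw [pvExtC]
  by_cases h1 : j < s.length
  · rw [if_pos h1, if_neg (fun h2 => h ⟨h1, h2⟩)]
  · rw [if_neg h1]

theorem pvExtC_step (s : List Char) (c : Char) (j : Nat)
    (h1 : j < s.length) (h2 : s.getD j ' ' = c) : pvExtC s c j = pvExtC s c (j + 1) := by
  conv_lhs => rw [pvExtC]
  rw [if_pos h1, if_pos h2]

theorem pvExtC_end (s : List Char) (c : Char) (j : Nat) (h : pvExtC s c j < s.length) :
    ¬ s.getD (pvExtC s c j) ' ' = c := by
  by_cases h1 : j < s.length
  · by_cases h2 : s.getD j ' ' = c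
    · rw [pvExtC_step s c j h1 h2] at h ⊢
      exact pvExtC_end s c (j + 1) h
    · rw [pvExtC_stop s c j (by tauto)]
      exact h2
  · rw [pvExtC_stop s c j (by tauto)] at h
    omega
termination_by s.length - j

theorem pvExtendA_eq (s : List Char) (j : Nat) : pvExtendA s j = pvExtC s 'G' j := by
  rw [pvExtendA, pvExtC]
  split
  · split
    · exact pvExtendA_eq s (j + 1)
    · rfl
  · rfl
termination_by s.length - j

-- canonical decomposition: from a run start p, the maximal G-runs of length ≥ 3 at positions ≥ p
def pvRuns (s : List Char) (p : Nat) : List (Nat × Nat) :=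
  if h : p < s.length then
    (if 3 ≤ pvExtC s (s.getD p ' ') (p + 1) - p ∧ s.getD p ' ' = 'G'
     then [(p, pvExtC s (s.getD p ' ') (p + 1))] else [])
      ++ pvRuns s (pvExtC s (s.getD p ' ') (p + 1))
  else []
termination_by s.length - p
decreasing_by
  have := le_pvExtC s (s.getD p ' ') (p + 1); omega

-- "GGG" at p, characterized pointwise
theorem match_iff (s : List Char) (p : Nat) :
    (s.drop p).take 3 = ['G', 'G', 'G'] ↔
      p + 3 ≤ s.length ∧ s.getD p ' ' = 'G' ∧ s.getD (p + 1) ' ' = 'G' ∧ s.getD (p + 2) ' ' = 'G' := by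
  constructor
  · intro h
    have hlen : ((s.drop p).take 3).length = 3 := by rw [h]; rfl
    simp only [List.length_take, List.length_drop] at hlen
    have h3 : p + 3 ≤ s.length := by omega
    have e0 : s.drop p = s[p] :: s.drop (p + 1) := List.drop_eq_getElem_cons (by omega)
    have e1 : s.drop (p + 1) = s[p + 1] :: s.drop (p + 2) := List.drop_eq_getElem_cons (by omega)
    have e2 : s.drop (p + 2) = s[p + 2] :: s.drop (p + 3) := List.drop_eq_getElem_cons (by omega)
    rw [e0, e1, e2] at h
    simp only [List.take, List.cons.injEq, and_true] at h
    refine ⟨h3, ?_, ?_, ?_⟩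
    · rw [List.getD_eq_getElem s ' ' (by omega : p < s.length)]; tauto
    · rw [List.getD_eq_getElem s ' ' (by omega : p + 1 < s.length)]; tauto
    · rw [List.getD_eq_getElem s ' ' (by omega : p + 2 < s.length)]; tauto
  · rintro ⟨h3, h0, h1, h2⟩
    have e0 : s.drop p = s.getD p ' ' :: s.drop (p + 1) := by
      rw [List.getD_eq_getElem s ' ' (by omega : p < s.length)]
      exact List.drop_eq_getElem_cons (by omega)
    have e1 : s.drop (p + 1) = s.getD (p + 1) ' ' :: s.drop (p + 2) := by
      rw [List.getD_eq_getElem s ' ' (by omega : p + 1 < s.length)]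
      exact List.drop_eq_getElem_cons (by omega)
    have e2 : s.drop (p + 2) = s.getD (p + 2) ' ' :: s.drop (p + 3) := by
      rw [List.getD_eq_getElem s ' ' (by omega : p + 2 < s.length)]
      exact List.drop_eq_getElem_cons (by omega)
    rw [e0, e1, e2]
    show [s.getD p ' ', s.getD (p + 1) ' ', s.getD (p + 2) ' '] = ['G', 'G', 'G']
    rw [h0, h1, h2]

-- A skips positions where no "GGG" match starts
theorem pvScanA_skip (s : List Char) (p q : Nat) (acc : List (Nat × Nat))
    (hpq : p ≤ q) (hq : q ≤ s.length)
    (hnm : ∀ k, p ≤ k → k < q → ¬ (s.drop k).take 3 = ['G', 'G', 'G']) :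
    pvScanA s p acc = pvScanA s q acc := by
  rcases Nat.eq_or_lt_of_le hpq with h | h
  · subst h; rfl
  · by_cases hp3 : p + 3 ≤ s.length
    · rw [pvScanA, dif_pos hp3, if_neg (hnm p le_rfl h)]
      exact pvScanA_skip s (p + 1) q acc (by omega) hq (fun k hk1 hk2 => hnm k (by omega) hk2)
    · rw [pvScanA, dif_neg hp3, pvScanA, dif_neg (by omega)]
termination_by q - p

-- main A lemma: from a run start p, A appends exactly the canonical runs from p
theorem pvScanA_main (s : List Char) (p : Nat) (acc : List (Nat × Nat))
    (hp : p ≤ s.length)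
    (hb : p = 0 ∨ p = s.length ∨ ¬ s.getD (p - 1) ' ' = s.getD p ' ') :
    pvScanA s p acc = acc ++ pvRuns s p := by
  by_cases hlt : p < s.length
  · have hj1 : p + 1 ≤ pvExtC s (s.getD p ' ') (p + 1) := le_pvExtC s (s.getD p ' ') (p + 1)
    set c := s.getD p ' ' with hc
    set j := pvExtC s c (p + 1) with hj
    have hjle : j ≤ s.length := pvExtC_le_length s c (p + 1) (by omega)
    have hrun : ∀ k, p ≤ k → k < j → s.getD k ' ' = c := by
      intro k hk1 hk2
      rcases Nat.eq_or_lt_of_le hk1 with h | h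
      · subst h; rfl
      · exact pvExtC_chars s c (p + 1) k h hk2
    have hend : j < s.length → ¬ s.getD j ' ' = c := fun hh => pvExtC_end s c (p + 1) (hj ▸ hh)
    have hbj : j = s.length ∨ ¬ s.getD (j - 1) ' ' = s.getD j ' ' := by
      by_cases hjl : j < s.length
      · right
        have h1 : s.getD (j - 1) ' ' = c := hrun (j - 1) (by omega) (by omega)
        have h2 := hend hjl
        rw [h1]; exact fun hh => h2 hh.symm
      · left; omega
    rw [pvRuns, dif_pos hlt, ← hc, ← hj]
    by_cases hcase : 3 ≤ j - p ∧ c = 'G'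
    · obtain ⟨h3, cG⟩ := hcase
      have hmatch : (s.drop p).take 3 = ['G', 'G', 'G'] := by
        rw [match_iff]
        exact ⟨by omega, cG ▸ hrun p le_rfl (by omega),
          cG ▸ hrun (p + 1) (by omega) (by omega), cG ▸ hrun (p + 2) (by omega) (by omega)⟩
      have hA : pvExtendA s (p + 3) = j := by
        rw [pvExtendA_eq, hj, cG]
        rw [← pvExtC_step s 'G' (p + 2) (by omega) (cG ▸ hrun (p + 2) (by omega) (by omega)),
            ← pvExtC_step s 'G' (p + 1) (by omega) (cG ▸ hrun (p + 1) (by omega) (by omega))]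
      rw [pvScanA, dif_pos (by omega), if_pos hmatch, hA,
          pvScanA_main s j (acc ++ [(p, j)]) hjle (Or.inr hbj), if_pos ⟨h3, cG⟩]
      simp
    · have hnm : ∀ k, p ≤ k → k < j → ¬ (s.drop k).take 3 = ['G', 'G', 'G'] := by
        intro k hk1 hk2 hm
        rw [match_iff] at hm
        obtain ⟨hk3, m0, m1, m2⟩ := hm
        by_cases cG : c = 'G'
        · have h3 : j - p < 3 := by
            by_contra hcon
            exact hcase ⟨by omega, cG⟩
          have hjk : j = k + 1 ∨ j = k + 2 := by omega
          have hjlen : j < s.length := by omega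
          have := hend hjlen
          rcases hjk with h | h <;> rw [h] at this <;> [exact this (cG ▸ m1); exact this (cG ▸ m2)]
        · exact cG ((hrun k hk1 hk2).symm.trans m0)
      rw [pvScanA_skip s p j acc (by omega) hjle hnm,
          pvScanA_main s j acc hjle (Or.inr hbj), if_neg hcase]
      simp
  · rw [pvScanA, dif_neg (by omega), pvRuns, dif_neg (by omega), List.append_nil]
termination_by s.length - p
decreasing_by
  · omega
  · omega

theorem foldl_const {α β : Type} (f : β → α → β) (b : β) (l : List α)
    (h : ∀ x ∈ l, f b x = b) : l.foldl f b = b := by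
  induction l with
  | nil => rfl
  | cons x xs ih =>
    simp only [List.foldl_cons, h x (by simp)]
    exact ih (fun y hy => h y (by simp [hy]))

-- main B lemma: from a run start p, the remaining fold appends exactly the canonical runs from p
theorem pvFoldB_main (s : List Char) (p : Nat) (acc : List (Nat × Nat))
    (hp : p ≤ s.length)
    (hb : p = 0 ∨ p = s.length ∨ ¬ s.getD (p - 1) ' ' = s.getD p ' ') :
    (List.range' (p + 1) (s.length - p)).foldl (pvStepB s) (acc, p)
      = (acc ++ pvRuns s p, if s.length = p then p else s.length) := by
  by_cases hlt : p < s.length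
  · have hj1 : p + 1 ≤ pvExtC s (s.getD p ' ') (p + 1) := le_pvExtC s (s.getD p ' ') (p + 1)
    set c := s.getD p ' ' with hc
    set j := pvExtC s c (p + 1) with hj
    have hjle : j ≤ s.length := pvExtC_le_length s c (p + 1) (by omega)
    have hrun : ∀ k, p ≤ k → k < j → s.getD k ' ' = c := by
      intro k hk1 hk2
      rcases Nat.eq_or_lt_of_le hk1 with h | h
      · subst h; rfl
      · exact pvExtC_chars s c (p + 1) k h hk2
    have hend : j < s.length → ¬ s.getD j ' ' = c := fun hh => pvExtC_end s c (p + 1) (hj ▸ hh)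
    have hbj : j = s.length ∨ ¬ s.getD (j - 1) ' ' = s.getD j ' ' := by
      by_cases hjl : j < s.length
      · right
        have h1 : s.getD (j - 1) ' ' = c := hrun (j - 1) (by omega) (by omega)
        have h2 := hend hjl
        rw [h1]; exact fun hh => h2 hh.symm
      · left; omega
    -- split the index range at j
    have hsplit : List.range' (p + 1) (s.length - p)
        = List.range' (p + 1) (j - p - 1) ++ List.range' j (s.length - j + 1) := by
      have h := List.range'_append (s := p + 1) (m := j - p - 1) (n := s.length - j + 1) (step := 1)
      rw [show (p + 1) + 1 * (j - p - 1) = j by omega] at h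
      rw [show s.length - p = (j - p - 1) + (s.length - j + 1) by omega, ← h]
    rw [hsplit, List.foldl_append]
    -- inside the run nothing happens
    have hskip : (List.range' (p + 1) (j - p - 1)).foldl (pvStepB s) (acc, p) = (acc, p) := by
      apply foldl_const
      intro i hi
      rw [List.mem_range'_1] at hi
      have hi1 : p + 1 ≤ i := hi.1
      have hi2 : i < j := by omega
      have hiq : s.getD i ' ' = s.getD (i - 1) ' ' := by
        rw [hrun i (by omega) hi2, hrun (i - 1) (by omega) (by omega)]
      rw [pvStepB, if_neg (by push_neg; exact ⟨by omega, by simpa using hiq⟩)]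
    rw [hskip]
    -- the boundary step at i = j
    rw [show s.length - j + 1 = (s.length - j) + 1 by omega, List.range'_succ, List.foldl_cons]
    have hstep : pvStepB s (acc, p) j
        = ((if 3 ≤ j - p ∧ s.getD p ' ' = 'G' then acc ++ [(p, j)] else acc), j) := by
      rw [pvStepB, if_pos]
      rcases hbj with h | h
      · exact Or.inl h
      · exact Or.inr (fun hh => h hh.symm)
    rw [hstep]
    have hrec := pvFoldB_main s j (if 3 ≤ j - p ∧ s.getD p ' ' = 'G' then acc ++ [(p, j)] else acc)
      hjle (Or.inr hbj)
    rw [hrec]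
    conv_rhs => rw [pvRuns, dif_pos hlt]
    rw [← hc, ← hj]
    simp only [Prod.mk.injEq]
    constructor
    · by_cases hcase : 3 ≤ j - p ∧ c = 'G'
      · rw [if_pos hcase, if_pos (hc ▸ hcase)]; simp
      · rw [if_neg hcase, if_neg (hc ▸ hcase)]; simp
    · have : s.length ≠ p := by omega
      by_cases hje : s.length = j <;> simp [hje, this]
  · have hpl : p = s.length := by omega
    rw [show s.length - p = 0 by omega]
    simp [List.range', pvRuns, dif_neg (by omega : ¬ p < s.length), hpl]
termination_by s.length - p
decreasing_by
  omega

-- the two gidx computations agree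
theorem gidx_eq (s : List Char) :
    pvScanA s 0 [] = ((List.range' 1 s.length).foldl (pvStepB s) ([], 0)).1 := by
  have hA := pvScanA_main s 0 [] (Nat.zero_le _) (Or.inl rfl)
  have hB := pvFoldB_main s 0 [] (Nat.zero_le _) (Or.inl rfl)
  rw [Nat.sub_zero] at hB
  rw [hA]
  have hB' : (List.range' 1 s.length).foldl (pvStepB s) ([], 0)
      = (([] : List (Nat × Nat)) ++ pvRuns s 0, if s.length = 0 then 0 else s.length) := by
    simpa using hB
  rw [hB']

-- ===== VERDICT (by name: the statement is the Claim_ definition above) =====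
theorem parse_g4_sections_spec : Claim_equal_parse_g4_sections := by
  intro seq _
  unfold Spec_parse_g4_sections
  simp only [parse_g4_sections, parse_g4_sections_alt]
  rw [← gidx_eq (pvNorm seq)]
  generalize pvScanA (pvNorm seq) 0 [] = L
  by_cases hlen : L.length < 4
  · rw [if_pos hlen, if_pos hlen]
  · rw [if_neg hlen, if_neg hlen]
    obtain ⟨a, b, c, d, t, rfl⟩ : ∃ a b c d t, L = a :: b :: c :: d :: t := by
      match L, hlen with
      | a :: b :: c :: d :: t, _ => exact ⟨a, b, c, d, t, rfl⟩
      | [], h | [_], h | [_, _], h | [_, _, _], h => simp at h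
    rfl
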